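-- pv_equiv track=rewrite | github.com/imgogole/Aucun-Sens-OpenAI-Instance | OpenAI.py | correctly
-- ===== SOURCE A (Python) =====
-- no_answer = "Je ne peux pas vraiment te répondre à ça..."
--
-- def correctly(text: str) :
--     sentences = text.split("\n")
--     for i in range(len(sentences)) : sentences[i] = sentences[i].strip().replace("\n", "")
--     lengths = tuple(map(lambda s: len(s), sentences))
--     max_length = max(lengths)
--     result = no_answer
--     index = -1
--     for i in range(len(lengths)) :
--         length = lengths[i]
--         if length == max_length :
--             index = i
--     if index != -1 :
--         result = sentences[index]
--     return result
-- ===== SOURCE B (Python) =====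
-- no_answer = "Je ne peux pas vraiment te répondre à ça..."
--
-- def correctly(text: str):
--     best, best_len = no_answer, -1
--     for line in text.split("\n"):
--         line = line.strip()
--         if best_len <= len(line):
--             best, best_len = line, len(line)
--     return best
-- ===== Notes on version B (the rewrite author's own statement) =====
-- stated objective: simpler
-- what changed: Replaced A's four sequential passes (in-place strip/replace loop, lengths tuple, max(), last-index scan, final lookup) with one loop maintaining a running last-argmax (best line, best length).
import Mathlib
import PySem

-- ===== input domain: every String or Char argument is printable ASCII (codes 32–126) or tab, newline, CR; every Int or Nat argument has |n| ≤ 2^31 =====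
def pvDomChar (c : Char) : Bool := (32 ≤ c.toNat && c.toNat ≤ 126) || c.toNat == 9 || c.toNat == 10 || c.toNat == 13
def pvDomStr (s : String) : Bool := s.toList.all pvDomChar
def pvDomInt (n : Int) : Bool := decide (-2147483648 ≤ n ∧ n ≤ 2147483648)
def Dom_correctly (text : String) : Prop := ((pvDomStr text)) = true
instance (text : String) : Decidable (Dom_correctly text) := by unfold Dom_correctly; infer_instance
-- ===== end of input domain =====

-- B replaces A's four sequential passes (in-place strip loop, lengths tuple, max(), last-index scan)
-- with one loop keeping a running last-argmax; objective: simpler.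

def pvNoAnswer : String := "Je ne peux pas vraiment te répondre à ça..."

-- ===== PORT A =====
def correctly (text : String) : String :=
  -- sentences = text.split("\n")  (sep "\n" is nonempty, so split? never returns none)
  let sentences0 : List String := (PySem.Str.split? text "\n").getD []
  -- for i in range(len(sentences)): sentences[i] = sentences[i].strip().replace("\n", "")
  -- (in-place elementwise rewrite of the list, ported as a map keeping the same per-element computation)
  let sentences := sentences0.map (fun s => PySem.Str.replace (PySem.Str.strip s) "\n" "")
  -- lengths = tuple(map(lambda s: len(s), sentences))
  let lengths := sentences.map PySem.Str.len
  -- max_length = max(lengths)  (raises only on an empty tuple, which split never produces)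
  let maxLength := (PySem.List.max? lengths (fun y => y)).getD 0
  let result := pvNoAnswer
  -- for i in range(len(lengths)): length = lengths[i]; if length == max_length: index = i
  let index := (PySem.List.enumerate lengths).foldl
      (fun idx p => if p.2 = maxLength then p.1 else idx) (-1)
  if index ≠ -1 then PySem.List.pyGetD sentences index pvNoAnswer else result

-- ===== PORT B =====
def correctly_alt (text : String) : String :=
  (((PySem.Str.split? text "\n").getD []).foldl
      (fun acc s =>
        let line := PySem.Str.strip s
        if acc.2 ≤ PySem.Str.len line then (line, PySem.Str.len line) else acc)
      (pvNoAnswer, (-1 : Int))).1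

-- ===== PRECONDITION & SPEC =====
def Spec_correctly (text : String) (out : String) : Prop := out = correctly_alt text
instance (text : String) (out : String) : Decidable (Spec_correctly text out) := by unfold Spec_correctly; infer_instance

-- ===== CLAIM (what is proved, stated in full; the proofs are below) =====
def Claim_equal_correctly : Prop := ∀ (text : String), Dom_correctly text → Spec_correctly text (correctly text)

-- ===== LEMMAS AND PROOFS =====

-- abbreviations for the two loop bodies
def pvG (acc : String × Int) (x : String) : String × Int :=
  if acc.2 ≤ PySem.Str.len x then (x, PySem.Str.len x) else acc

def pvMx (L : List String) : Int := L.foldl (fun a x => max a (PySem.Str.len x)) (-1)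

def pvIdx (L : List String) (M : Int) : Int :=
  (PySem.List.enumerate (L.map PySem.Str.len)).foldl
    (fun idx p => if p.2 = M then p.1 else idx) (-1)

-- A's tail computation, on the already-rewritten sentence list
def pvResA (L : List String) : String :=
  let lengths := L.map PySem.Str.len
  let maxLength := (PySem.List.max? lengths (fun y => y)).getD 0
  let index := (PySem.List.enumerate lengths).foldl
      (fun idx p => if p.2 = maxLength then p.1 else idx) (-1)
  if index ≠ -1 then PySem.List.pyGetD L index pvNoAnswer else pvNoAnswer

theorem pvG_eq (acc : String × Int) (x : String) :
    pvG acc x = if acc.2 ≤ PySem.Str.len x then (x, PySem.Str.len x) else acc := rfl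

theorem pv_len_nonneg (s : String) : 0 ≤ PySem.Str.len s := by
  rw [PySem.Str.len_eq]; exact Int.natCast_nonneg _

theorem pv_enumerate_append {α : Type} (L : List α) (x : α) (start : Int) :
    PySem.List.enumerate (L ++ [x]) start
      = PySem.List.enumerate L start ++ [(start + L.length, x)] := by
  induction L generalizing start with
  | nil => simp [PySem.List.enumerate]
  | cons y t ih =>
      simp [PySem.List.enumerate, ih (start + 1)]
      ring_nf

theorem pv_mx_append (L : List String) (x : String) :
    pvMx (L ++ [x]) = max (pvMx L) (PySem.Str.len x) := by
  simp [pvMx]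

theorem pv_idx_append (L : List String) (x : String) (M : Int) :
    pvIdx (L ++ [x]) M = if PySem.Str.len x = M then (L.length : Int) else pvIdx L M := by
  simp [pvIdx, pv_enumerate_append]

-- the combined loop invariant, proved by reverse induction on the sentence list
theorem pv_main (L : List String) :
    (L = [] ∧ L.foldl pvG (pvNoAnswer, -1) = (pvNoAnswer, -1)) ∨
    (∃ k : Nat, k < L.length ∧ pvIdx L (pvMx L) = (k : Int) ∧
      (∀ h : k < L.length, L[k] = (L.foldl pvG (pvNoAnswer, -1)).1) ∧
      (L.foldl pvG (pvNoAnswer, -1)).2 = pvMx L) := by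
  induction L using List.reverseRecOn with
  | nil => left; simp
  | append_singleton L x ih =>
      right
      rw [List.foldl_append]
      simp only [List.foldl_cons, List.foldl_nil]
      by_cases hM : pvMx L ≤ PySem.Str.len x
      · -- the new element becomes the running argmax
        have hfold2 : (L.foldl pvG (pvNoAnswer, -1)).2 ≤ PySem.Str.len x := by
          rcases ih with ⟨-, h⟩ | ⟨k, hk, hi, he, h2⟩
          · rw [h]; have := pv_len_nonneg x; omega
          · rw [h2]; exact hM
        have hg : pvG (L.foldl pvG (pvNoAnswer, -1)) x = (x, PySem.Str.len x) := by
          rw [pvG_eq, if_pos hfold2]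
        refine ⟨L.length, by simp, ?_, ?_, ?_⟩
        · rw [pv_idx_append, pv_mx_append, if_pos (max_eq_right hM).symm]
        · intro h; simp [hg]
        · rw [hg, pv_mx_append]; omega
      · -- the new element is strictly shorter than the running max
        rw [not_le] at hM
        have hL : L ≠ [] := by
          rintro rfl
          simp [pvMx] at hM
          have := pv_len_nonneg x; omega
        rcases ih with ⟨h, -⟩ | ⟨k, hk, hi, he, h2⟩
        · exact absurd h hL
        have hg : pvG (L.foldl pvG (pvNoAnswer, -1)) x = L.foldl pvG (pvNoAnswer, -1) := by
          rw [pvG_eq, if_neg (by omega)]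
        have hmx : max (pvMx L) (PySem.Str.len x) = pvMx L := max_eq_left (le_of_lt hM)
        refine ⟨k, by simp; omega, ?_, ?_, ?_⟩
        · rw [pv_idx_append, pv_mx_append, hmx, if_neg (by omega)]
          exact hi
        · intro h
          rw [List.getElem_append_left hk, hg]
          exact he hk
        · rw [hg, h2, pv_mx_append, hmx]

-- max(lengths) agrees with the running max pvMx on a nonempty list
theorem pv_max_eq (x : String) (t : List String) :
    ((PySem.List.max? ((x :: t).map PySem.Str.len) (fun y => y)).getD 0) = pvMx (x :: t) := by
  rw [List.map_cons, PySem.List.max?_id_cons]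
  simp only [Option.getD_some, pvMx, List.foldl_cons, List.foldl_map]
  rw [show max (-1) (PySem.Str.len x) = PySem.Str.len x from
    max_eq_right (by have := pv_len_nonneg x; omega)]

theorem pv_resA_eq (L : List String) :
    pvResA L = (L.foldl pvG (pvNoAnswer, -1)).1 := by
  rcases pv_main L with ⟨rfl, h⟩ | ⟨k, hk, hi, he, -⟩
  · rw [h]
    simp [pvResA, PySem.List.max?]
  · cases L with
    | nil => simp at hk
    | cons x t =>
        have h0 : pvResA (x :: t)
            = (if pvIdx (x :: t)
                  ((PySem.List.max? ((x :: t).map PySem.Str.len) (fun y => y)).getD 0) ≠ -1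
               then PySem.List.pyGetD (x :: t)
                  (pvIdx (x :: t)
                    ((PySem.List.max? ((x :: t).map PySem.Str.len) (fun y => y)).getD 0))
                  pvNoAnswer
               else pvNoAnswer) := rfl
        rw [h0, pv_max_eq x t, hi, if_pos (by omega), PySem.List.pyGetD_natCast,
          List.getD_eq_getElem?_getD, List.getElem?_eq_getElem hk, Option.getD_some]
        exact he hk

-- ---- the split pieces contain no '\n', so A's `.replace("\n","")` is the identity ----

theorem pv_go_no_sep (c : Char) :
    ∀ (fuel : Nat) (l cur : List Char) (acc : List (List Char)),
      l.length < fuel → c ∉ cur → (∀ p ∈ acc, c ∉ p) →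
      ∀ p ∈ PySem.Chars.splitOn.go [c] fuel l cur acc, c ∉ p := by
  intro fuel
  induction fuel with
  | zero => intro l cur acc h; omega
  | succ n ih =>
      intro l cur acc hlen hcur hacc p hp
      cases l with
      | nil =>
          rw [show PySem.Chars.splitOn.go [c] (n+1) [] cur acc = (cur.reverse :: acc).reverse from rfl] at hp
          simp at hp
          rcases hp with hp | hp
          · exact hacc p hp
          · subst hp; simpa using hcur
      | cons d rest =>
          rw [show PySem.Chars.splitOn.go [c] (n+1) (d :: rest) cur acc
              = if List.isPrefixOf [c] (d :: rest) = true then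
                  PySem.Chars.splitOn.go [c] n (List.drop (List.length [c]) (d :: rest)) [] (cur.reverse :: acc)
                else PySem.Chars.splitOn.go [c] n rest (d :: cur) acc from rfl] at hp
          by_cases hpre : List.isPrefixOf [c] (d :: rest) = true
          · rw [if_pos hpre] at hp
            refine ih _ [] _ (by simpa using hlen) (by simp) ?_ p hp
            intro q hq
            simp at hq
            rcases hq with hq | hq
            · subst hq; simpa using hcur
            · exact hacc q hq
          · rw [if_neg hpre] at hp
            have hdc : d ≠ c := by
              intro h; subst h
              simp [List.isPrefixOf] at hpre
            refine ih rest (d :: cur) acc (by simpa using hlen) ?_ hacc p hp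
            simp
            exact ⟨fun h => hdc h.symm, hcur⟩

theorem pv_splitOn_no_sep (s : List Char) (c : Char) :
    ∀ p ∈ PySem.Chars.splitOn s [c], c ∉ p := by
  unfold PySem.Chars.splitOn
  exact pv_go_no_sep c (s.length + 1) s [] [] (by omega) (by simp) (by simp)

theorem pv_replace_go_id (c : Char) :
    ∀ (fuel : Nat) (l acc : List Char), l.length ≤ fuel → c ∉ l →
      PySem.Chars.replace.go [c] [] fuel l acc = acc.reverse ++ l := by
  intro fuel
  induction fuel with
  | zero =>
      intro l acc hlen _
      cases l with
      | nil => rfl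
      | cons d rest => simp at hlen
  | succ n ih =>
      intro l acc hlen hl
      cases l with
      | nil => simp only [List.append_nil]; rfl
      | cons d rest =>
          rw [show PySem.Chars.replace.go [c] [] (n+1) (d :: rest) acc
              = if List.isPrefixOf [c] (d :: rest) = true then
                  PySem.Chars.replace.go [c] [] n (List.drop (List.length [c]) (d :: rest)) (List.reverse [] ++ acc)
                else PySem.Chars.replace.go [c] [] n rest (d :: acc) from rfl]
          have hdc : d ≠ c := by intro h; exact hl (by simp [h])
          rw [if_neg (by simp [List.isPrefixOf]; intro h; exact absurd h.symm hdc)]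
          rw [ih rest (d :: acc) (by simpa using hlen) (fun h => hl (by simp [h]))]
          simp

theorem pv_replace_id (l : List Char) (c : Char) (h : c ∉ l) :
    PySem.Chars.replace l [c] [] = l := by
  unfold PySem.Chars.replace
  rw [if_neg (by simp)]
  simpa using pv_replace_go_id c l.length l [] le_rfl h

theorem pv_strip_no_mem (l : List Char) (c : Char) (h : c ∉ l) :
    c ∉ PySem.Chars.strip l := by
  unfold PySem.Chars.strip PySem.Chars.rstrip PySem.Chars.lstrip
  intro hc
  apply h
  have h1 := (List.dropWhile_sublist (l := (List.dropWhile PySem.Chars.isspace l).reverse)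
      (p := PySem.Chars.isspace)).mem (by simpa using hc)
  simp at h1
  exact (List.dropWhile_sublist (l := l) (p := PySem.Chars.isspace)).mem h1

-- on every piece of text.split("\n"), strip-then-replace("\n","") is just strip
theorem pv_pieces_eq (text : String) :
    ((PySem.Str.split? text "\n").getD []).map
        (fun s => PySem.Str.replace (PySem.Str.strip s) "\n" "")
      = ((PySem.Str.split? text "\n").getD []).map PySem.Str.strip := by
  apply List.map_congr_left
  intro p hp
  rw [← String.toList_inj, PySem.Str.toList_replace, PySem.Str.toList_strip]
  have hsep : ("\n" : String).toList = ['\n'] := by decide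
  have hempty : ("" : String).toList = [] := by decide
  rw [hsep, hempty]
  apply pv_replace_id
  apply pv_strip_no_mem
  -- p.toList is a piece of Chars.splitOn text.toList ['\n']
  have hsplit := PySem.Str.split?_map text "\n"
  rw [hsep] at hsplit
  unfold PySem.Chars.split? at hsplit
  rw [if_neg (by simp)] at hsplit
  cases hs : PySem.Str.split? text "\n" with
  | none => rw [hs] at hsplit; simp at hsplit
  | some l =>
      rw [hs] at hsplit
      simp at hsplit
      rw [hs] at hp
      simp at hp
      apply pv_splitOn_no_sep text.toList '\n'
      rw [← hsplit]
      exact List.mem_map_of_mem hp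

-- ===== VERDICT (by name: the statement is the Claim_ definition above) =====
theorem correctly_spec : Claim_equal_correctly := by
  intro text _
  unfold Spec_correctly
  have hA : correctly text
      = pvResA (((PySem.Str.split? text "\n").getD []).map
          (fun s => PySem.Str.replace (PySem.Str.strip s) "\n" "")) := rfl
  have hB : correctly_alt text
      = ((((PySem.Str.split? text "\n").getD []).map PySem.Str.strip).foldl
          pvG (pvNoAnswer, -1)).1 := by
    show ((((PySem.Str.split? text "\n").getD []).foldl
        (fun acc s => pvG acc (PySem.Str.strip s)) (pvNoAnswer, -1))).1 = _
    rw [List.foldl_map]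
  rw [hA, hB, pv_pieces_eq]
  exact pv_resA_eq _
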